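-- pv_equiv track=rewrite | github.com/arpruss/gcodeplot | gcodeplot.py | removePenBob
-- ===== SOURCE A (Python) =====
-- def removePenBob(data):
--     """
--     Merge segments with same beginning and end
--     """
--
--     outData = {}
--
--     for pen in data:
--         outSegments = []
--         outSegment = []
--
--         for segment in data[pen]:
--             if not outSegment:
--                 outSegment = list(segment)
--             elif outSegment[-1] == segment[0]:
--                 outSegment += segment[1:]
--             else:
--                 outSegments.append(outSegment)
--                 outSegment = list(segment)
--
--         if outSegment:
--             outSegments.append(outSegment)
--
--         if outSegments:
--             outData[pen] = outSegments
--
--     return outData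
-- ===== SOURCE B (Python) =====
-- def removePenBob(data):
--     """
--     Merge segments with same beginning and end
--     """
--     out = {}
--     for pen, segs in data.items():
--         # pass 1: group consecutive chainable segments
--         groups = []
--         for seg in segs:
--             if not seg:
--                 continue
--             if groups and groups[-1][-1][-1] == seg[0]:
--                 groups[-1].append(seg)
--             else:
--                 groups.append([seg])
--         # pass 2: flatten each group into one merged segment
--         merged = [list(g[0]) + [p for s in g[1:] for p in s[1:]] for g in groups]
--         if merged:
--             out[pen] = merged
--     return out
-- ===== Notes on version B (the rewrite author's own statement) =====
-- stated objective: alternative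
-- what changed: B replaces A's single fold that mutates a running merged segment with a two-pass decomposition per pen: a grouping pass that collects chainable segments into groups (skipping empty segments instead of resetting), then a flattening pass that concatenates each group (first segment plus the tails of the rest).
import Mathlib
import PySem

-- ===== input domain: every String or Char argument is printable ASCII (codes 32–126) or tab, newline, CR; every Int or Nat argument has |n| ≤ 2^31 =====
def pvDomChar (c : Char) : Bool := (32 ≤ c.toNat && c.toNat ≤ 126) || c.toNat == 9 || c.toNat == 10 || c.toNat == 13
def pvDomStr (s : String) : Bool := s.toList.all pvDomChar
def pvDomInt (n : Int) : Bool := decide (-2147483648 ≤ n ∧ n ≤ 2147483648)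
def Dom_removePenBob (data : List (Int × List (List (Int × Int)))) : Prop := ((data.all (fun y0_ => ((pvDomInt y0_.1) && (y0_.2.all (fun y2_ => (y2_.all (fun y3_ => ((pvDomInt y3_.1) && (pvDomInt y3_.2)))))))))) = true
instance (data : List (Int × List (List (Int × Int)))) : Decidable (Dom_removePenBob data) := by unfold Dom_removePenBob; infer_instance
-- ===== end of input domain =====

-- Header: B re-implements A's single mutating fold as a two-pass decomposition per pen
-- (group chainable segments, then flatten each group); same cost, different structure.

-- ===== PORT A =====
-- one step of A's inner loop; state = (outSegments, outSegment)
def stepA (st : List (List (Int × Int)) × List (Int × Int)) (segment : List (Int × Int)) :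
    List (List (Int × Int)) × List (Int × Int) :=
  let (outSegments, outSegment) := st
  if outSegment.isEmpty then
    (outSegments, segment)                                   -- outSegment = list(segment)
  else
    match PySem.List.pyGet? segment 0 with                   -- segment[0]
    | none => (outSegments, outSegment)                      -- IndexError in Python (outside Pre_)
    | some p =>
      if PySem.List.pyGet? outSegment (-1) = some p then     -- outSegment[-1] == segment[0]
        (outSegments, outSegment ++ PySem.List.slice segment (some 1) none)  -- += segment[1:]
      else
        (outSegments ++ [outSegment], segment)

def removePenBob (data : List (Int × List (List (Int × Int)))) : List (Int × List (List (Int × Int))) :=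
  data.foldl (fun outData pr =>
    let (outSegments, outSegment) := pr.2.foldl stepA ([], [])
    let outSegments := if outSegment.isEmpty then outSegments else outSegments ++ [outSegment]
    if outSegments.isEmpty then outData else outData ++ [(pr.1, outSegments)]) []

-- ===== PORT B =====
-- pass 1 step: put seg into the last group if it chains, else start a new group
def stepB (groups : List (List (List (Int × Int)))) (seg : List (Int × Int)) :
    List (List (List (Int × Int))) :=
  if seg.isEmpty then groups
  else
    match groups.getLast? with
    | none => groups ++ [[seg]]
    | some g =>
      if g.getLast?.bind List.getLast? = seg.head? then      -- groups[-1][-1][-1] == seg[0]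
        groups.dropLast ++ [g ++ [seg]]
      else
        groups ++ [[seg]]

-- pass 2: flatten one group: first segment plus the tails of the rest
def flattenG (g : List (List (Int × Int))) : List (Int × Int) :=
  match g with
  | [] => []
  | s :: rest => s ++ rest.flatMap (·.drop 1)

def removePenBob_alt (data : List (Int × List (List (Int × Int)))) : List (Int × List (List (Int × Int))) :=
  data.foldl (fun out pr =>
    let merged := (pr.2.foldl stepB []).map flattenG
    if merged.isEmpty then out else out ++ [(pr.1, merged)]) []

-- ===== PRECONDITION & SPEC =====
-- Pre_ excludes exactly the inputs on which A raises IndexError: a pen whose segment list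
-- contains an empty segment after a nonempty one (then segment[0] is evaluated on []).
def Pre_removePenBob (data : List (Int × List (List (Int × Int)))) : Prop :=
  ∀ pr ∈ data, ((pr.2.dropWhile List.isEmpty).all (fun s => !s.isEmpty)) = true
instance (data : List (Int × List (List (Int × Int)))) : Decidable (Pre_removePenBob data) := by
  unfold Pre_removePenBob; infer_instance

def pvWitness_removePenBob : (List (Int × List (List (Int × Int)))) :=
  [(1, [[], [(0,0)], [(0,0),(1,1)], [(2,2)]])]

def Spec_removePenBob (data : List (Int × List (List (Int × Int)))) (out : List (Int × List (List (Int × Int)))) : Prop := out = removePenBob_alt data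
instance (data : List (Int × List (List (Int × Int)))) (out : List (Int × List (List (Int × Int)))) : Decidable (Spec_removePenBob data out) := by unfold Spec_removePenBob; infer_instance

-- ===== CLAIM (what is proved, stated in full; the proofs are below) =====
def Claim_equal_removePenBob : Prop := ∀ (data : List (Int × List (List (Int × Int)))), Dom_removePenBob data → Pre_removePenBob data → Spec_removePenBob data (removePenBob data)

-- ===== LEMMAS AND PROOFS =====

-- the loop invariant tying A's state to B's groups
def MergeInv (st : List (List (Int × Int)) × List (Int × Int)) (groups : List (List (List (Int × Int)))) : Prop :=
  st.1 = groups.dropLast.map flattenG ∧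
  (match groups.getLast? with
   | none => st.2 = [] ∧ groups = []
   | some g => st.2 = flattenG g ∧ st.2.getLast? = g.getLast?.bind List.getLast? ∧ st.2 ≠ [])

lemma flattenG_snoc (g : List (List (Int × Int))) (s : List (Int × Int)) (hg : g ≠ []) :
    flattenG (g ++ [s]) = flattenG g ++ s.drop 1 := by
  cases g with
  | nil => exact absurd rfl hg
  | cons s0 rest => simp [flattenG]

lemma getLast_append_chain (xs : List (Int × Int)) (p : Int × Int) (s : List (Int × Int))
    (h : xs.getLast? = some p) :
    (xs ++ s).getLast? = (p :: s).getLast? := by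
  cases s with
  | nil => simpa using h
  | cons q t =>
    have hs : (q :: t).getLast?.isSome := by
      rw [List.getLast?_isSome]; simp
    rw [List.getLast?_append, Option.or_of_isSome hs,
        show (p :: q :: t).getLast? = (q :: t).getLast? from rfl]

lemma stepInv (st : List (List (Int × Int)) × List (Int × Int)) (groups : List (List (List (Int × Int))))
    (seg : List (Int × Int)) (hI : MergeInv st groups) (hne : seg ≠ []) :
    MergeInv (stepA st seg) (stepB groups seg) := by
  obtain ⟨oss, os⟩ := st
  obtain ⟨h1, h2⟩ := hI
  cases seg with
  | nil => exact absurd rfl hne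
  | cons p s =>
  cases hg : groups.getLast? with
  | none =>
    rw [hg] at h2
    obtain ⟨hos, hgr⟩ := h2
    subst hos hgr
    simp at h1; subst h1
    simp [stepA, stepB, MergeInv, flattenG]
  | some g =>
    rw [hg] at h2
    obtain ⟨hos, hlast, hosne⟩ := h2
    obtain ⟨gs, hgs⟩ : ∃ gs, groups = gs ++ [g] := by
      rcases List.eq_nil_or_concat groups with h | ⟨gs, x, hx⟩
      · simp [h] at hg
      · rw [List.concat_eq_append] at hx
        subst hx
        simp at hg
        exact ⟨gs, by rw [hg]⟩
    have hgne : g ≠ [] := by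
      intro h; rw [h] at hos; simp [flattenG] at hos; exact hosne hos
    subst hgs
    simp only [stepA, stepB]
    rw [if_neg (show ¬ os.isEmpty = true by simpa using hosne)]
    rw [if_neg (show ¬ (p :: s).isEmpty = true by simp)]
    rw [PySem.List.pyGet?_zero_cons, PySem.List.pyGet?_neg_one]
    simp only [hg]
    by_cases hc : os.getLast? = some p
    · have : g.getLast?.bind List.getLast? = (p :: s).head? := by
        rw [← hlast, hc]; rfl
      rw [this]
      simp only [hc, ite_true]
      constructor
      · simpa using h1
      · rw [List.getLast?_concat]
        refine ⟨?_, ?_, by simp [hosne]⟩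
        · rw [flattenG_snoc g (p :: s) hgne, ← hos]
          simp [PySem.List.slice_from_one]
        · simp only [PySem.List.slice_from_one, List.tail_cons, List.getLast?_concat]
          rw [getLast_append_chain os p s hc]
          simp
    · have : ¬ g.getLast?.bind List.getLast? = (p :: s).head? := by
        rw [← hlast]; simpa using hc
      rw [if_neg this, if_neg hc]
      constructor
      · simp
        exact ⟨by simpa using h1, hos⟩
      · simp [flattenG]

lemma foldInv (segs : List (List (Int × Int)))
    (st : List (List (Int × Int)) × List (Int × Int)) (groups : List (List (List (Int × Int))))
    (hI : MergeInv st groups)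
    (hstart : st.2 ≠ [] → segs.all (fun s => !s.isEmpty) = true)
    (hpre : st.2 = [] → groups = [] ∧ ((segs.dropWhile List.isEmpty).all (fun s => !s.isEmpty)) = true) :
    MergeInv (segs.foldl stepA st) (segs.foldl stepB groups) := by
  induction segs generalizing st groups with
  | nil => simpa using hI
  | cons seg rest ih =>
    by_cases hseg : seg = []
    · subst hseg
      have hos : st.2 = [] := by
        by_contra h
        have := hstart h
        simp at this
      obtain ⟨hgr, hdw⟩ := hpre hos
      obtain ⟨oss, os⟩ := st
      simp only at hos; subst hos hgr
      have h1 : oss = [] := by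
        obtain ⟨h1, h2⟩ := hI; simpa using h1
      subst h1
      have hA : stepA ([], []) [] = ([], []) := by simp [stepA]
      have hB : stepB [] [] = [] := by simp [stepB]
      simp only [List.foldl_cons, hA, hB]
      apply ih _ _ hI
      · intro h; simp at h
      · intro _
        refine ⟨rfl, ?_⟩
        simpa [List.dropWhile] using hdw
    · have hall : rest.all (fun s => !s.isEmpty) = true ∧ seg ≠ [] := by
        by_cases hos : st.2 = []
        · obtain ⟨_, hdw⟩ := hpre hos
          rw [List.dropWhile_cons] at hdw
          rw [if_neg (show ¬ seg.isEmpty = true by simpa using hseg)] at hdw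
          simp at hdw
          exact ⟨by simpa using hdw.2, hseg⟩
        · have := hstart hos
          simp at this
          exact ⟨by simpa using this.2, hseg⟩
      have hI' := stepInv st groups seg hI hall.2
      simp only [List.foldl_cons]
      apply ih _ _ hI'
      · intro _; exact hall.1
      · intro hos'
        exfalso
        -- after a nonempty seg, A's outSegment is nonempty
        obtain ⟨h1, h2⟩ := hI'
        cases hg : (stepB groups seg).getLast? with
        | none =>
          rw [hg] at h2
          -- stepB on a nonempty seg always yields a nonempty groups list
          have : stepB groups seg ≠ [] := by
            simp only [stepB]
            rw [if_neg (by simpa using hseg)]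
            cases hgl : groups.getLast? with
            | none => simp
            | some g => split <;> (try split) <;> simp
          exact this h2.2
        | some g =>
          rw [hg] at h2
          exact h2.2.2 hos'

lemma inner_eq (segs : List (List (Int × Int)))
    (hpre : ((segs.dropWhile List.isEmpty).all (fun s => !s.isEmpty)) = true) :
    (let st := segs.foldl stepA ([], [])
     if st.2.isEmpty then st.1 else st.1 ++ [st.2]) = (segs.foldl stepB []).map flattenG := by
  have hI0 : MergeInv ([], []) ([] : List (List (List (Int × Int)))) := by simp [MergeInv]
  have hI := foldInv segs ([], []) [] hI0 (by intro h; simp at h) (by intro _; exact ⟨rfl, hpre⟩)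
  set st := segs.foldl stepA ([], []) with hst
  set groups := segs.foldl stepB [] with hgr
  obtain ⟨h1, h2⟩ := hI
  cases hg : groups.getLast? with
  | none =>
    rw [hg] at h2
    obtain ⟨hos, hgrp⟩ := h2
    simp [hos, hgrp] at h1 ⊢
    simp [h1]
  | some g =>
    rw [hg] at h2
    obtain ⟨hos, _, hosne⟩ := h2
    obtain ⟨gs, hgs⟩ : ∃ gs, groups = gs ++ [g] := by
      rcases List.eq_nil_or_concat groups with h | ⟨gs, x, hx⟩
      · simp [h] at hg
      · rw [List.concat_eq_append] at hx
        rw [hx] at hg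
        simp at hg
        exact ⟨gs, by rw [hx, hg]⟩
    rw [if_neg (show ¬ st.2.isEmpty = true by simpa using hosne)]
    rw [hgs] at h1 ⊢
    simp at h1
    simp [h1, hos]

lemma outer_eq (data : List (Int × List (List (Int × Int))))
    (hpre : Pre_removePenBob data) :
    ∀ acc : List (Int × List (List (Int × Int))),
      data.foldl (fun outData pr =>
        let (outSegments, outSegment) := pr.2.foldl stepA ([], [])
        let outSegments := if outSegment.isEmpty then outSegments else outSegments ++ [outSegment]
        if outSegments.isEmpty then outData else outData ++ [(pr.1, outSegments)]) acc =
      data.foldl (fun out pr =>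
        let merged := (pr.2.foldl stepB []).map flattenG
        if merged.isEmpty then out else out ++ [(pr.1, merged)]) acc := by
  induction data with
  | nil => intro acc; rfl
  | cons pr rest ih =>
    intro acc
    have hpr := hpre pr (by simp)
    have hrest : Pre_removePenBob rest := fun q hq => hpre q (by simp [hq])
    have hinner := inner_eq pr.2 hpr
    rw [List.foldl_cons, List.foldl_cons]
    have hstep :
        (match pr.2.foldl stepA ([], []) with
         | (outSegments, outSegment) =>
           let outSegments := if outSegment.isEmpty then outSegments else outSegments ++ [outSegment]
           if outSegments.isEmpty then acc else acc ++ [(pr.1, outSegments)]) =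
        (let merged := (pr.2.foldl stepB []).map flattenG
         if merged.isEmpty then acc else acc ++ [(pr.1, merged)]) := by
      rcases h : pr.2.foldl stepA ([], []) with ⟨oss, os⟩
      simp only [h] at hinner ⊢
      rw [← hinner]
    rw [hstep]
    exact ih hrest _

-- ===== VERDICT (by name: the statement is the Claim_ definition above) =====
theorem removePenBob_spec : Claim_equal_removePenBob := by
  intro data _ hpre
  unfold Spec_removePenBob removePenBob removePenBob_alt
  exact outer_eq data hpre []
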